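-- pv_equiv track=rewrite | github.com/CodeKokeshi/Koke16-bit-Studio | daw/theory.py | _nearest_in_range
-- ===== SOURCE A (Python) =====
-- def _nearest_in_range(
--     midi_note: int,
--     target_pcs: set[int] | frozenset[int],
--     lo: int,
--     hi: int,
-- ) -> int | None:
--     """Find the nearest MIDI note with a pitch class in *target_pcs*
--     within the range [lo, hi]."""
--     best: int | None = None
--     best_dist = 999
--     for pc in target_pcs:
--         for offset in range(-12, 13):
--             candidate = midi_note + offset
--             if lo <= candidate <= hi and candidate % 12 == pc:
--                 if abs(offset) < best_dist:
--                     best_dist = abs(offset)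
--                     best = candidate
--     return best
-- ===== SOURCE B (Python) =====
-- def _nearest_in_range(midi_note, target_pcs, lo, hi):
--     """Closed-form per pitch class: instead of scanning 25 offsets, derive the
--     (at most three) offsets in [-12, 12] congruent to the pitch class."""
--     best = None
--     best_dist = 999
--     for pc in target_pcs:
--         if not 0 <= pc < 12:
--             continue
--         r = (pc - midi_note) % 12
--         offs = [r - 12, r] + ([12] if r == 0 else [])
--         cand = [o for o in offs if lo <= midi_note + o <= hi]
--         if not cand:
--             continue
--         o = min(cand, key=abs)
--         if abs(o) < best_dist:
--             best_dist = abs(o)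
--             best = midi_note + o
--     return best
-- ===== Notes on version B (the rewrite author's own statement) =====
-- stated objective: faster
-- what changed: The inner 25-iteration offset scan per pitch class is replaced by closed-form arithmetic: r = (pc - midi_note) % 12 gives the at most three congruent offsets in [-12,12], which are range-filtered and resolved by min(, key=abs) with ties going to the negative offset.
import Mathlib
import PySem

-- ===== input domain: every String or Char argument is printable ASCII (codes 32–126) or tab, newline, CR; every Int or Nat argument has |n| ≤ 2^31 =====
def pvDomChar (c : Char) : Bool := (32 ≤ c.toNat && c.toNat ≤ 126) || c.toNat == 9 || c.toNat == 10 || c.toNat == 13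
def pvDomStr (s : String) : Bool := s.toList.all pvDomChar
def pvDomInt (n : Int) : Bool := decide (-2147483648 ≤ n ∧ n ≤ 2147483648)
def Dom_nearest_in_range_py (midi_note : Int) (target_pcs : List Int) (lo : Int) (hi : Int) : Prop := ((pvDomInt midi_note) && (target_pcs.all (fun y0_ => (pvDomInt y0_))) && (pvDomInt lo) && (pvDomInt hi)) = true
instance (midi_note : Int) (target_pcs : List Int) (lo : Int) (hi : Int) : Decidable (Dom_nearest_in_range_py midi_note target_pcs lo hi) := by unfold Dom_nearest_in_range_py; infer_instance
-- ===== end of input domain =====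

-- B replaces A's 25-iteration inner offset scan by arithmetic: the (at most three)
-- offsets in [-12,12] congruent to the pitch class, computed in closed form (objective: faster inner step).

-- ===== PORT A =====
-- body of A's inner loop (offset scan), named for the proofs
def pvStepA (midi_note lo hi pc : Int) (st : Option Int × Int) (offset : Int) : Option Int × Int :=
  let candidate := midi_note + offset
  if lo ≤ candidate ∧ candidate ≤ hi ∧ PySem.Int.mod candidate 12 = pc then
    if |offset| < st.2 then (some candidate, |offset|) else st
  else st

def nearest_in_range_py (midi_note : Int) (target_pcs : List Int) (lo : Int) (hi : Int) : Option Int :=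
  (target_pcs.foldl
    (fun st pc => (PySem.List.pyRange (-12) 13 1).foldl (pvStepA midi_note lo hi pc) st)
    ((none : Option Int), (999 : Int))).1

-- ===== PORT B =====
-- body of B's per-pitch-class step, named for the proofs
def pvStepB (midi_note lo hi : Int) (st : Option Int × Int) (pc : Int) : Option Int × Int :=
  if 0 ≤ pc ∧ pc < 12 then
    let r := PySem.Int.mod (pc - midi_note) 12
    let offs := [r - 12, r] ++ (if r = 0 then [(12 : Int)] else [])
    let cand := offs.filter (fun o => decide (lo ≤ midi_note + o ∧ midi_note + o ≤ hi))
    match PySem.List.min? cand (fun o => |o|) with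
    | none => st
    | some o => if |o| < st.2 then (some (midi_note + o), |o|) else st
  else st

def nearest_in_range_py_alt (midi_note : Int) (target_pcs : List Int) (lo : Int) (hi : Int) : Option Int :=
  (target_pcs.foldl (pvStepB midi_note lo hi) ((none : Option Int), (999 : Int))).1

-- ===== PRECONDITION & SPEC =====
def Spec_nearest_in_range_py (midi_note : Int) (target_pcs : List Int) (lo : Int) (hi : Int) (out : Option Int) : Prop := out = nearest_in_range_py_alt midi_note target_pcs lo hi
instance (midi_note : Int) (target_pcs : List Int) (lo : Int) (hi : Int) (out : Option Int) : Decidable (Spec_nearest_in_range_py midi_note target_pcs lo hi out) := by unfold Spec_nearest_in_range_py; infer_instance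

-- ===== CLAIM (what is proved, stated in full; the proofs are below) =====
def Claim_equal_nearest_in_range_py : Prop := ∀ (midi_note : Int) (target_pcs : List Int) (lo : Int) (hi : Int), Dom_nearest_in_range_py midi_note target_pcs lo hi → Spec_nearest_in_range_py midi_note target_pcs lo hi (nearest_in_range_py midi_note target_pcs lo hi)

-- ===== LEMMAS AND PROOFS =====

-- dropping elements on which the step is the identity
theorem pv_foldl_id_filter {α : Type} (f : α → Int → α) (p : Int → Bool)
    (h : ∀ a o, p o = false → f a o = a) :
    ∀ (L : List Int) (a : α), L.foldl f a = (L.filter p).foldl f a := by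
  intro L
  induction L with
  | nil => intro a; rfl
  | cons x t ih =>
    intro a
    by_cases hp : p x = true
    · simp [List.filter, hp, ih]
    · simp only [List.foldl, List.filter, Bool.not_eq_true] at *
      rw [h a x (by simpa using hp), hp, ih]

-- A's inner 25-offset scan equals B's closed-form per-pitch-class step
theorem pv_inner_eq (midi_note lo hi pc : Int) (st : Option Int × Int) :
    (PySem.List.pyRange (-12) 13 1).foldl (pvStepA midi_note lo hi pc) st
      = pvStepB midi_note lo hi st pc := by
  have hconst : ∀ a : Int, PySem.Int.mod a 12 = a % 12 :=
    fun a => PySem.Int.mod_eq_emod_of_pos (by norm_num)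
  by_cases hpc : 0 ≤ pc ∧ pc < 12
  · obtain ⟨h0, h12⟩ := hpc
    obtain ⟨r, hrdef, hr0, hr12⟩ : ∃ r, (pc - midi_note) % 12 = r ∧ 0 ≤ r ∧ r < 12 :=
      ⟨_, rfl, Int.emod_nonneg _ (by norm_num), Int.emod_lt_of_pos _ (by norm_num)⟩
    rw [pv_foldl_id_filter (pvStepA midi_note lo hi pc) (fun o => decide (o % 12 = r))
      (by
        intro a o hpo
        simp only [decide_eq_false_iff_not] at hpo
        simp only [pvStepA, hconst]
        rw [if_neg]
        rintro ⟨-, -, h3⟩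
        omega)]
    have hfilt : (PySem.List.pyRange (-12) 13 1).filter (fun o => decide (o % 12 = r))
        = [r - 12, r] ++ (if r = 0 then [(12 : Int)] else []) := by
      interval_cases r <;> decide
    rw [hfilt]
    simp only [pvStepB, if_pos (⟨h0, h12⟩ : 0 ≤ pc ∧ pc < 12), hconst, hrdef]
    rcases st with ⟨b, d⟩
    by_cases hr : r = 0
    · subst hr
      have hm1 : (midi_note + ((0:Int) - 12)) % 12 = pc := by omega
      have hm2 : (midi_note + (0:Int)) % 12 = pc := by omega
      have hm3 : (midi_note + (12:Int)) % 12 = pc := by omega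
      by_cases hq1 : lo ≤ midi_note + ((0:Int) - 12) ∧ midi_note + ((0:Int) - 12) ≤ hi <;>
      by_cases hq2 : lo ≤ midi_note + (0:Int) ∧ midi_note + (0:Int) ≤ hi <;>
      by_cases hq3 : lo ≤ midi_note + (12:Int) ∧ midi_note + (12:Int) ≤ hi <;>
        simp only [if_pos, List.cons_append, List.nil_append, List.foldl, pvStepA, hconst, hm1,
          hm2, hm3, and_true, List.filter, hq1, hq2, hq3, decide_true, decide_false,
          PySem.List.min?, List.foldl_cons, List.foldl_nil] <;>
        norm_num <;>
        split_ifs <;> (try norm_num) <;> (try simp_all) <;> omega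
    · have hm1 : (midi_note + (r - 12)) % 12 = pc := by omega
      have hm2 : (midi_note + r) % 12 = pc := by omega
      have ha1 : |r - 12| = 12 - r := by rw [abs_of_nonpos (by omega)]; ring
      have ha2 : |r| = r := abs_of_nonneg hr0
      by_cases hq1 : lo ≤ midi_note + (r - 12) ∧ midi_note + (r - 12) ≤ hi <;>
      by_cases hq2 : lo ≤ midi_note + r ∧ midi_note + r ≤ hi <;>
        simp only [if_neg hr, List.append_nil, List.foldl, pvStepA, hconst, hm1, hm2, and_true,
          List.filter, hq1, hq2, decide_true, decide_false, PySem.List.min?, List.foldl_cons,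
          List.foldl_nil, ha1, ha2] <;>
        split_ifs <;> (try simp only [ha1, ha2]) <;> (try split_ifs) <;> (try rfl) <;> (exfalso; omega)
  · have hid : ∀ (a : Option Int × Int) (o : Int), pvStepA midi_note lo hi pc a o = a := by
      intro a o
      simp only [pvStepA, hconst]
      rw [if_neg]
      rintro ⟨-, -, h3⟩
      omega
    have hfold : ∀ (L : List Int) (a : Option Int × Int),
        L.foldl (pvStepA midi_note lo hi pc) a = a := by
      intro L
      induction L with
      | nil => intro a; rfl
      | cons x t ih => intro a; simp [List.foldl, hid, ih]
    rw [hfold, pvStepB, if_neg hpc]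

-- ===== VERDICT (by name: the statement is the Claim_ definition above) =====
theorem nearest_in_range_py_spec : Claim_equal_nearest_in_range_py := by
  intro midi_note target_pcs lo hi _
  unfold Spec_nearest_in_range_py nearest_in_range_py nearest_in_range_py_alt
  congr 1
  have : (fun (st : Option Int × Int) (pc : Int) =>
      List.foldl (pvStepA midi_note lo hi pc) st (PySem.List.pyRange (-12) 13))
      = pvStepB midi_note lo hi :=
    funext fun st => funext fun pc => pv_inner_eq midi_note lo hi pc st
  rw [this]
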